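-- pv_equiv track=rewrite | github.com/matjussu/OrientIA | src/collect/crous.py | _parse_opening_pattern
-- ===== SOURCE A (Python) =====
-- _OPENING_DAYS = ("lundi", "mardi", "mercredi", "jeudi", "vendredi", "samedi", "dimanche")
--
-- _OPENING_SLOTS = ("matin", "midi", "soir")
--
-- def _parse_opening_pattern(pattern: str | None) -> dict[str, str]:
--     """`110,110,110,110,110,000,000` → {lundi: 'matin+midi', …, samedi: 'ferme'}.
--
--     Triplet = (matin, midi, soir). 1=ouvert, 0=fermé. Mapping jour → label.
--     """
--     if not pattern:
--         return {}
--     parts = [p.strip() for p in pattern.split(",")]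
--     result: dict[str, str] = {}
--     for day, triplet in zip(_OPENING_DAYS, parts):
--         if len(triplet) != 3 or set(triplet) - {"0", "1"}:
--             continue
--         labels = [svc for flag, svc in zip(triplet, _OPENING_SLOTS) if flag == "1"]
--         result[day] = "+".join(labels) if labels else "ferme"
--     return result
-- ===== SOURCE B (Python) =====
-- _OPENING_DAYS = ("lundi", "mardi", "mercredi", "jeudi", "vendredi", "samedi", "dimanche")
--
-- # label for every possible length-3 binary triplet; anything else is skipped
-- _TRIPLET_LABELS = {
--     "000": "ferme",
--     "001": "soir",
--     "010": "midi",
--     "011": "midi+soir",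
--     "100": "matin",
--     "101": "matin+soir",
--     "110": "matin+midi",
--     "111": "matin+midi+soir",
-- }
--
--
-- def _parse_opening_pattern(pattern):
--     if not pattern:
--         return {}
--     result = {}
--     for day, part in zip(_OPENING_DAYS, pattern.split(",")):
--         label = _TRIPLET_LABELS.get(part.strip())
--         if label is not None:
--             result[day] = label
--     return result
-- ===== Notes on version B (the rewrite author's own statement) =====
-- stated objective: simpler
-- what changed: Replaces per-triplet character validation and label construction with a single lookup in a precomputed table of all eight binary triplets (invalid triplets are simply absent keys).
import Mathlib
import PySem

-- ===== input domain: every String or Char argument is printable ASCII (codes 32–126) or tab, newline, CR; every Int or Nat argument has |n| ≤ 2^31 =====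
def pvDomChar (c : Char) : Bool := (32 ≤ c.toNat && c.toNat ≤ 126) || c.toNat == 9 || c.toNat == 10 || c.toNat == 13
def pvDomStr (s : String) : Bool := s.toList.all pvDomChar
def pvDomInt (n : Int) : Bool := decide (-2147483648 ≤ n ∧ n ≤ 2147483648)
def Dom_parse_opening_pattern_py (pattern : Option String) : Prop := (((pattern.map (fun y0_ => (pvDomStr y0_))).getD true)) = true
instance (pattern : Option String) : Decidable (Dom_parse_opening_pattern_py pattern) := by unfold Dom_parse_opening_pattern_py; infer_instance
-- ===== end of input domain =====

-- B replaces A's per-triplet validation and label construction with a single lookup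
-- in a precomputed 8-entry table of all binary triplets (simpler).

-- ===== PORT A =====
def pvDays : List String := ["lundi", "mardi", "mercredi", "jeudi", "vendredi", "samedi", "dimanche"]
def pvSlots : List String := ["matin", "midi", "soir"]

-- A's loop body: dt.2 is the already-stripped triplet
def pvStepA (result : PySem.Dict String String) (dt : String × String) : PySem.Dict String String :=
  if ¬ (PySem.Str.len dt.2 = 3) ∨
     ¬ (PySem.Set.diff (PySem.Set.ofList dt.2.toList) ['0', '1'] = []) then
    result
  else
    let labels := (List.zip dt.2.toList pvSlots).filterMap
      (fun fs => if fs.1 = '1' then some fs.2 else none)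
    result.insert dt.1 (if ¬ (labels = []) then PySem.Str.join "+" labels else "ferme")

def parse_opening_pattern_py (pattern : Option String) : List (String × String) :=
  match pattern with
  | none => []
  | some s =>
    if s = "" then [] else
      let parts := ((PySem.Str.split? s ",").getD []).map PySem.Str.strip
      let result := (List.zip pvDays parts).foldl pvStepA PySem.Dict.empty
      result.items

-- ===== PORT B =====
def pvTripletLabels : PySem.Dict String String := PySem.Dict.mk
  [("000", "ferme"), ("001", "soir"), ("010", "midi"), ("011", "midi+soir"),
   ("100", "matin"), ("101", "matin+soir"), ("110", "matin+midi"), ("111", "matin+midi+soir")]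

-- B's loop body: strip and look the triplet up in the table
def pvStepB (result : PySem.Dict String String) (dt : String × String) : PySem.Dict String String :=
  match pvTripletLabels.get? (PySem.Str.strip dt.2) with
  | some label => result.insert dt.1 label
  | none => result

def parse_opening_pattern_py_alt (pattern : Option String) : List (String × String) :=
  match pattern with
  | none => []
  | some s =>
    if s = "" then [] else
      let result := (List.zip pvDays ((PySem.Str.split? s ",").getD [])).foldl pvStepB PySem.Dict.empty
      result.items

-- ===== PRECONDITION & SPEC =====
def Spec_parse_opening_pattern_py (pattern : Option String) (out : List (String × String)) : Prop := out = parse_opening_pattern_py_alt pattern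
instance (pattern : Option String) (out : List (String × String)) : Decidable (Spec_parse_opening_pattern_py pattern out) := by unfold Spec_parse_opening_pattern_py; infer_instance

-- ===== CLAIM (what is proved, stated in full; the proofs are below) =====
def Claim_equal_parse_opening_pattern_py : Prop := ∀ (pattern : Option String), Dom_parse_opening_pattern_py pattern → Spec_parse_opening_pattern_py pattern (parse_opening_pattern_py pattern)

-- ===== LEMMAS AND PROOFS =====

-- "valid triplet" as A checks it: length 3, only '0'/'1'
def pvOk (cs : List Char) : Prop := cs.length = 3 ∧ ∀ x ∈ cs, x = '0' ∨ x = '1'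

theorem pvOk_iff (cs : List Char) : pvOk cs ↔
    cs ∈ [['0','0','0'], ['0','0','1'], ['0','1','0'], ['0','1','1'],
          ['1','0','0'], ['1','0','1'], ['1','1','0'], ['1','1','1']] := by
  constructor
  · rintro ⟨h3, hb⟩
    match cs, h3 with
    | [a, b, c], _ =>
      rcases hb a (by simp) with rfl | rfl <;>
        rcases hb b (by simp) with rfl | rfl <;>
          rcases hb c (by simp) with rfl | rfl <;> decide
  · intro h
    simp only [List.mem_cons, List.not_mem_nil, or_false] at h
    rcases h with rfl | rfl | rfl | rfl | rfl | rfl | rfl | rfl <;> exact ⟨rfl, by simp⟩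

theorem get?_labels_none (u : String) (h : ¬ pvOk u.toList) :
    pvTripletLabels.get? u = none := by
  have hk : ∀ k : String, pvOk k.toList → u ≠ k := by
    rintro k hkok rfl; exact h hkok
  simp only [pvTripletLabels, PySem.Dict.get?_mk_cons, beq_iff_eq]
  rw [if_neg (fun he => hk _ ⟨by simp, by simp⟩ he.symm), if_neg (fun he => hk _ ⟨by simp, by simp⟩ he.symm),
      if_neg (fun he => hk _ ⟨by simp, by simp⟩ he.symm), if_neg (fun he => hk _ ⟨by simp, by simp⟩ he.symm),
      if_neg (fun he => hk _ ⟨by simp, by simp⟩ he.symm), if_neg (fun he => hk _ ⟨by simp, by simp⟩ he.symm),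
      if_neg (fun he => hk _ ⟨by simp, by simp⟩ he.symm), if_neg (fun he => hk _ ⟨by simp, by simp⟩ he.symm)]
  rfl

theorem stepA_eq (d : PySem.Dict String String) (day u : String) :
    pvStepA d (day, u) =
      match pvTripletLabels.get? u with
      | some label => d.insert day label
      | none => d := by
  by_cases h : pvOk u.toList
  · have hmem := (pvOk_iff u.toList).mp h
    simp only [List.mem_cons, List.not_mem_nil, or_false] at hmem
    rcases hmem with he | he | he | he | he | he | he | he
    · rw [show u = "000" from String.toList_inj.mp (by rw [he]; rfl)]
      simp [pvStepA, pvTripletLabels, PySem.Dict.get?_mk_cons, pvSlots, PySem.Str.len,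
        PySem.Set.diff, PySem.Set.ofList, PySem.Set.add, PySem.Set.contains,
        PySem.Str.join, PySem.Chars.join, List.intercalate, List.filterMap_cons,
        List.intersperse, ← String.toList_inj]
    · rw [show u = "001" from String.toList_inj.mp (by rw [he]; rfl)]
      simp [pvStepA, pvTripletLabels, PySem.Dict.get?_mk_cons, pvSlots, PySem.Str.len,
        PySem.Set.diff, PySem.Set.ofList, PySem.Set.add, PySem.Set.contains,
        PySem.Str.join, PySem.Chars.join, List.intercalate, List.filterMap_cons,
        List.intersperse, ← String.toList_inj]
    · rw [show u = "010" from String.toList_inj.mp (by rw [he]; rfl)]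
      simp [pvStepA, pvTripletLabels, PySem.Dict.get?_mk_cons, pvSlots, PySem.Str.len,
        PySem.Set.diff, PySem.Set.ofList, PySem.Set.add, PySem.Set.contains,
        PySem.Str.join, PySem.Chars.join, List.intercalate, List.filterMap_cons,
        List.intersperse, ← String.toList_inj]
    · rw [show u = "011" from String.toList_inj.mp (by rw [he]; rfl)]
      simp [pvStepA, pvTripletLabels, PySem.Dict.get?_mk_cons, pvSlots, PySem.Str.len,
        PySem.Set.diff, PySem.Set.ofList, PySem.Set.add, PySem.Set.contains,
        PySem.Str.join, PySem.Chars.join, List.intercalate, List.filterMap_cons,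
        List.intersperse, ← String.toList_inj]
    · rw [show u = "100" from String.toList_inj.mp (by rw [he]; rfl)]
      simp [pvStepA, pvTripletLabels, PySem.Dict.get?_mk_cons, pvSlots, PySem.Str.len,
        PySem.Set.diff, PySem.Set.ofList, PySem.Set.add, PySem.Set.contains,
        PySem.Str.join, PySem.Chars.join, List.intercalate, List.filterMap_cons,
        List.intersperse, ← String.toList_inj]
    · rw [show u = "101" from String.toList_inj.mp (by rw [he]; rfl)]
      simp [pvStepA, pvTripletLabels, PySem.Dict.get?_mk_cons, pvSlots, PySem.Str.len,
        PySem.Set.diff, PySem.Set.ofList, PySem.Set.add, PySem.Set.contains,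
        PySem.Str.join, PySem.Chars.join, List.intercalate, List.filterMap_cons,
        List.intersperse, ← String.toList_inj]
    · rw [show u = "110" from String.toList_inj.mp (by rw [he]; rfl)]
      simp [pvStepA, pvTripletLabels, PySem.Dict.get?_mk_cons, pvSlots, PySem.Str.len,
        PySem.Set.diff, PySem.Set.ofList, PySem.Set.add, PySem.Set.contains,
        PySem.Str.join, PySem.Chars.join, List.intercalate, List.filterMap_cons,
        List.intersperse, ← String.toList_inj]
    · rw [show u = "111" from String.toList_inj.mp (by rw [he]; rfl)]
      simp [pvStepA, pvTripletLabels, PySem.Dict.get?_mk_cons, pvSlots, PySem.Str.len,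
        PySem.Set.diff, PySem.Set.ofList, PySem.Set.add, PySem.Set.contains,
        PySem.Str.join, PySem.Chars.join, List.intercalate, List.filterMap_cons,
        List.intersperse, ← String.toList_inj]
  · rw [get?_labels_none u h]
    unfold pvStepA
    rw [if_pos]
    by_cases h3 : u.toList.length = 3
    · right
      intro hdiff
      refine h ⟨h3, fun x hx => ?_⟩
      have hx' : x ∈ PySem.Set.ofList u.toList := (PySem.Set.mem_ofList _ _).mpr hx
      have := List.filter_eq_nil_iff.mp hdiff x hx'
      simp [PySem.Set.contains] at this
      tauto
    · left
      simp only [PySem.Str.len]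
      omega

theorem step_funs_eq :
    (fun (d : PySem.Dict String String) (p : String × String) => pvStepA d (Prod.map id PySem.Str.strip p)) = pvStepB := by
  funext d p
  cases p
  exact stepA_eq d _ _

theorem parse_opening_pattern_py_spec : Claim_equal_parse_opening_pattern_py := by
  intro pattern _
  unfold Spec_parse_opening_pattern_py
  match pattern with
  | none => rfl
  | some s =>
    unfold parse_opening_pattern_py parse_opening_pattern_py_alt
    by_cases hs : s = ""
    · simp [hs]
    · simp only [if_neg hs]
      congr 1
      rw [List.zip_map_right, List.foldl_map, step_funs_eq]
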